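-- pv_equiv track=rewrite | github.com/ayusharora99/Yelp_Reviews | SVM_updated.py | balance_data
-- ===== SOURCE A (Python) =====
-- from collections import Counter
--
-- def balance_data(txt, st):
--     frequency = Counter(st)
--
--     maximum_allowed = frequency.most_common()[-1][1]
--
--     freq = {var: 0 for var in frequency.keys()}
--
--     new_stars = []
--     new_txt = []
--     for i,y in enumerate(st):
--         if freq[y] < maximum_allowed:
--             new_stars.append(y)
--             new_txt.append(txt[i])
--             freq[y] += 1
--
--     return new_txt, new_stars
-- ===== SOURCE B (Python) =====
-- from collections import Counter
--
-- def balance_data(txt, st):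
--     maximum_allowed = Counter(st).most_common()[-1][1]
--
--     # group: label -> ordered list of its positions in st
--     positions = {}
--     for i, y in enumerate(st):
--         positions.setdefault(y, []).append(i)
--
--     # keep the first `maximum_allowed` positions of every label
--     selected = set()
--     for idxs in positions.values():
--         selected.update(idxs[:maximum_allowed])
--
--     new_txt = []
--     new_stars = []
--     for i in range(len(st)):
--         if i in selected:
--             new_txt.append(txt[i])
--             new_stars.append(st[i])
--     return new_txt, new_stars
-- ===== Notes on version B (the rewrite author's own statement) =====
-- stated objective: alternative
-- what changed: Instead of A's single pass that maintains a per-label taken-so-far counter dict capped at the minimum class frequency, B groups the positions of each label in one pass, takes the first maximum_allowed positions of every label into a selected-index set, and emits the kept rows in a second index pass.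
import Mathlib
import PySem

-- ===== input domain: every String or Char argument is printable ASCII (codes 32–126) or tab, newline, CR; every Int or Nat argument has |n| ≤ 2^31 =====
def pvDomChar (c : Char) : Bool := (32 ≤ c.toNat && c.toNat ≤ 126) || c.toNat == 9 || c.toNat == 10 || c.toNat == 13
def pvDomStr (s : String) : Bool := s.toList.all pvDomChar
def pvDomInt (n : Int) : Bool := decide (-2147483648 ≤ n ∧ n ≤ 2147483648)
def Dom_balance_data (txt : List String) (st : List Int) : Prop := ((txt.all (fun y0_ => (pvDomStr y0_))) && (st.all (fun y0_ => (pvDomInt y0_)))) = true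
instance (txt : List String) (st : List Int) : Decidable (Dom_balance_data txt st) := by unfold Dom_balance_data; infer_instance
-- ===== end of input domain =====

-- B balances the dataset by grouping each label's positions and filtering through a selected-index
-- set in a second pass, instead of A's running capped per-label counter; same value, no speed claim.

-- shared helper: `Counter(st).most_common()[-1][1]`, the identical source line of both Pythons
-- (most_common() = counter items sorted by count descending, stable; [-1] raises IndexError on
-- empty st — excluded by Pre_, so pyGetD's default pair is never used inside Pre_)
def pvMostCommonLastCnt (st : List Int) : Int :=
  (PySem.List.pyGetD
    (PySem.List.sorted (PySem.Dict.counter st).items (fun p => p.2) true) (-1) (0, 0)).2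

-- ===== PORT A =====
def balance_data (txt : List String) (st : List Int) : List String × List Int :=
  let maximum_allowed := pvMostCommonLastCnt st
  -- freq = {var: 0 for var in frequency.keys()}
  let freq : PySem.Dict Int Int :=
    (PySem.Dict.counter st).keys.foldl (fun d v => d.insert v 0) PySem.Dict.empty
  -- for i, y in enumerate(st): if freq[y] < maximum_allowed: append y and txt[i]; freq[y] += 1
  -- (freq[y] is getD: y is always a key of freq; txt[i] is read only inside the branch)
  let r :=
    (PySem.List.enumerate st 0).foldl
      (fun (acc : PySem.Dict Int Int × List Int × List String) iy =>
        if acc.1.getD iy.2 0 < maximum_allowed then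
          (acc.1.insert iy.2 (acc.1.getD iy.2 0 + 1),
           acc.2.1 ++ [iy.2],
           acc.2.2 ++ [PySem.List.pyGetD txt iy.1 ""])
        else acc)
      (freq, [], [])
  (r.2.2, r.2.1)

-- ===== PORT B =====
def balance_data_alt (txt : List String) (st : List Int) : List String × List Int :=
  let maximum_allowed := pvMostCommonLastCnt st
  -- positions.setdefault(y, []).append(i)  ==  positions[y] = positions.get(y, []) + [i]
  let positions : PySem.Dict Int (List Int) :=
    (PySem.List.enumerate st 0).foldl
      (fun d iy => d.modify iy.2 [] (fun l => l ++ [iy.1])) PySem.Dict.empty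
  -- selected.update(idxs[:maximum_allowed]) over positions.values()
  let selected : PySem.Set Int :=
    positions.values.foldl
      (fun s idxs => PySem.Set.update s (PySem.List.slice idxs none (some maximum_allowed)))
      PySem.Set.empty
  -- for i in range(len(st)): if i in selected: append txt[i] and st[i]
  (PySem.List.pyRange 0 st.length 1).foldl
    (fun (acc : List String × List Int) i =>
      if PySem.Set.contains selected i then
        (acc.1 ++ [PySem.List.pyGetD txt i ""], acc.2 ++ [PySem.List.pyGetD st i 0])
      else acc)
    ([], [])

-- ===== PRECONDITION & SPEC =====
-- the minimum class frequency of st (the value most_common()[-1][1] returns on nonempty st)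
def pvMinCnt (st : List Int) : Nat := (st.map (fun y => st.count y)).min?.getD 0

-- Pre_ excludes exactly the inputs where Python A raises: empty st (IndexError on
-- most_common()[-1]) and a txt too short at some index A selects (IndexError on txt[i]).
def Pre_balance_data (txt : List String) (st : List Int) : Prop :=
  st ≠ [] ∧ ∀ i, i < st.length → (st.take i).count (st.getD i 0) < pvMinCnt st → i < txt.length
instance (txt : List String) (st : List Int) : Decidable (Pre_balance_data txt st) := by
  unfold Pre_balance_data; infer_instance

def pvWitness_balance_data : List String × List Int := (["a", "b"], [1, 2])

def Spec_balance_data (txt : List String) (st : List Int) (out : List String × List Int) : Prop := out = balance_data_alt txt st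
instance (txt : List String) (st : List Int) (out : List String × List Int) : Decidable (Spec_balance_data txt st out) := by unfold Spec_balance_data; infer_instance

-- ===== CLAIM (what is proved, stated in full; the proofs are below) =====
def Claim_equal_balance_data : Prop := ∀ (txt : List String) (st : List Int), Dom_balance_data txt st → Pre_balance_data txt st → Spec_balance_data txt st (balance_data txt st)

-- ===== LEMMAS AND PROOFS =====

-- index i of st is kept iff fewer than m earlier positions carry the same label
def pvSel (st : List Int) (m : Int) (i : Nat) : Bool :=
  decide (((st.take i).count (st.getD i 0) : Int) < m)

def pvIdxs (st : List Int) (m : Int) : List Nat := (List.range st.length).filter (pvSel st m)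

-- the common value of both programs: the rows at the kept indices
def pvSpec (txt : List String) (st : List Int) (m : Int) : List String × List Int :=
  ((pvIdxs st m).map (fun (i : Nat) => PySem.List.pyGetD txt (i : Int) ""),
   (pvIdxs st m).map (fun i => st.getD i 0))

lemma pvM_nonneg (st : List Int) : 0 ≤ pvMostCommonLastCnt st := by
  unfold pvMostCommonLastCnt
  rcases eq_or_ne (PySem.List.sorted (PySem.Dict.counter st).items (fun p => p.2) true) [] with h | h
  · simp [h, PySem.List.pyGetD, PySem.List.pyGet?, PySem.List.pyIdx?]
  · rw [PySem.List.pyGetD_neg_one _ _ h]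
    have hmem := List.getLast_mem h
    rw [PySem.List.mem_sorted] at hmem
    have h2 : ∀ p ∈ (PySem.Dict.counter st).items, 0 ≤ p.2 := by
      intro p hp
      rw [PySem.Dict.items_counter] at hp
      obtain ⟨k, -, hk⟩ := List.mem_map.mp hp
      rw [← hk]; positivity
    exact h2 _ hmem

-- ----- A side: the loop with the capped counter dict keeps exactly the pvSel indices -----

lemma loopA (txt : List String) (st : List Int) (m : Int) :
  ∀ (suf pre : List Int) (d : PySem.Dict Int Int) (ns : List Int) (nt : List String),
    st = pre ++ suf →
    (∀ y, d.getD y 0 = min ((pre.count y : Int)) m) →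
    ((PySem.List.enumerate suf (pre.length : Int)).foldl
      (fun (acc : PySem.Dict Int Int × List Int × List String) iy =>
        if acc.1.getD iy.2 0 < m then
          (acc.1.insert iy.2 (acc.1.getD iy.2 0 + 1),
           acc.2.1 ++ [iy.2],
           acc.2.2 ++ [PySem.List.pyGetD txt iy.1 ""])
        else acc)
      (d, ns, nt)).2
    = (ns ++ ((List.range' pre.length suf.length).filter (pvSel st m)).map (fun i => st.getD i 0),
       nt ++ ((List.range' pre.length suf.length).filter (pvSel st m)).map (fun (i : Nat) => PySem.List.pyGetD txt (i : Int) "")) := by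
  intro suf
  induction suf with
  | nil => intro pre d ns nt hst hd; simp [PySem.List.enumerate]
  | cons y rest ih =>
    intro pre d ns nt hst hd
    have htake : st.take pre.length = pre := by rw [hst]; simp
    have hget : st.getD pre.length 0 = y := by
      rw [hst, List.getD_eq_getElem?_getD, List.getElem?_append_right (le_refl _)]; simp
    have hsel : pvSel st m pre.length = decide ((pre.count y : Int) < m) := by
      unfold pvSel; rw [htake, hget]
    have hlen1 : ((pre.length : Int) + 1) = (((pre ++ [y]).length : Int)) := by
      simp
    have hst' : st = (pre ++ [y]) ++ rest := by simp [hst]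
    have hlen2 : List.range' pre.length (y :: rest).length = pre.length :: List.range' (pre ++ [y]).length rest.length := by
      simp [List.range'_succ]
    rw [PySem.List.enumerate_cons, List.foldl_cons, hlen2]
    by_cases hc : ((pre.count y : Int) < m)
    · have hcond : d.getD y 0 < m := by rw [hd y]; omega
      simp only [hcond, if_pos]
      rw [hlen1, ih (pre ++ [y]) _ _ _ hst' ?_]
      · simp only [List.filter_cons, hsel, hc, decide_true, if_pos, List.map_cons, hget]
        simp [List.append_assoc]
      · intro y'
        rw [PySem.Dict.getD_insert, hd y, List.count_append]
        by_cases hy : y' = y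
        · subst hy; simp; omega
        · simp [hy, Ne.symm hy, hd y']
    · have hcond : ¬ (d.getD y 0 < m) := by rw [hd y]; omega
      simp only [hcond, if_neg, not_false_iff]
      rw [hlen1, ih (pre ++ [y]) _ _ _ hst' ?_]
      · simp [hsel, hc]
      · intro y'
        rw [hd y', List.count_append]
        by_cases hy : y' = y
        · subst hy; simp; omega
        · simp [Ne.symm hy]

lemma getD_foldl_insert_zero (l : List Int) :
    ∀ (d : PySem.Dict Int Int), (∀ y, d.getD y 0 = 0) →
    ∀ y, (l.foldl (fun d v => d.insert v (0 : Int)) d).getD y 0 = 0 := by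
  induction l with
  | nil => intro d h y; exact h y
  | cons v rest ih =>
    intro d h y
    rw [List.foldl_cons]
    refine ih _ (fun y' => ?_) y
    rw [PySem.Dict.getD_insert]
    split_ifs with h'
    · rfl
    · exact h y'

lemma balance_data_eq_pvSpec (txt : List String) (st : List Int) :
    balance_data txt st = pvSpec txt st (pvMostCommonLastCnt st) := by
  have hm := pvM_nonneg st
  simp only [balance_data]
  have hinv : ∀ y, ((PySem.Dict.counter st).keys.foldl (fun d v => d.insert v 0) PySem.Dict.empty).getD y 0
      = min ((([] : List Int).count y : Int)) (pvMostCommonLastCnt st) := by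
    intro y
    rw [getD_foldl_insert_zero _ PySem.Dict.empty (fun y => by simp [PySem.Dict.getD_empty]) y]
    simp
    omega
  have h := loopA txt st (pvMostCommonLastCnt st) st [] _ [] [] (by simp) hinv
  simp only [List.length_nil, Nat.cast_zero] at h
  rw [h]
  simp [pvSpec, pvIdxs, List.range_eq_range']

-- ----- B side: the grouped positions / selected-index-set pass keeps the same indices -----

lemma mem_foldl_update {β : Type} (l : List β) (f : β → List Int) (s : PySem.Set Int) (y : Int) :
    (y ∈ l.foldl (fun s b => PySem.Set.update s (f b)) s) ↔ y ∈ s ∨ ∃ b ∈ l, y ∈ f b := by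
  induction l generalizing s with
  | nil => simp
  | cons b rest ih =>
    rw [List.foldl_cons, ih, PySem.Set.mem_update]
    constructor
    · rintro (( h | h ) | ⟨c, hc, hy⟩)
      · exact Or.inl h
      · exact Or.inr ⟨b, List.mem_cons_self, h⟩
      · exact Or.inr ⟨c, List.mem_cons_of_mem _ hc, hy⟩
    · rintro (h | ⟨c, hc, hy⟩)
      · exact Or.inl (Or.inl h)
      · rcases List.mem_cons.mp hc with rfl | hc'
        · exact Or.inl (Or.inr hy)
        · exact Or.inr ⟨c, hc', hy⟩

-- x is among the first k positions of y in st iff x = s + j for a j-th occurrence with rank < k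
lemma mem_take_idx (y : Int) :
    ∀ (st : List Int) (s : Int) (k : Nat) (x : Int),
    (x ∈ (((PySem.List.enumerate st s).filter (fun p => p.2 == y)).map (·.1)).take k)
    ↔ ∃ j : Nat, j < st.length ∧ x = s + j ∧ st.getD j 0 = y ∧ (st.take j).count y < k := by
  intro st
  induction st with
  | nil => intro s k x; simp [PySem.List.enumerate]
  | cons z rest ih =>
    intro s k x
    rw [PySem.List.enumerate_cons]
    by_cases hz : z = y
    · subst hz
      simp only [List.filter_cons, beq_self_eq_true, if_pos, List.map_cons]
      cases k with
      | zero => simp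
      | succ k' =>
        rw [List.take_succ_cons]
        constructor
        · intro hx
          rcases List.mem_cons.mp hx with h | h
          · exact ⟨0, by simp, by simpa using h, by simp, by simp⟩
          · obtain ⟨j, hj, hx', hg, hc⟩ := (ih (s + 1) k' x).mp h
            refine ⟨j + 1, by simpa using Nat.succ_lt_succ hj, by push_cast at hx' ⊢; omega,
              by simpa using hg, ?_⟩
            simp
            omega
        · rintro ⟨j, hj, hx', hg, hc⟩
          cases j with
          | zero => exact List.mem_cons.mpr (Or.inl (by simpa using hx'))
          | succ j' =>
            refine List.mem_cons.mpr (Or.inr ((ih (s + 1) k' x).mpr ⟨j', by simpa using hj, by push_cast at hx' ⊢; omega, by simpa using hg, ?_⟩))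
            simp at hc
            omega
    · have hzb : (z == y) = false := by simp [hz]
      simp only [List.filter_cons, hzb, if_neg, Bool.false_eq_true, not_false_iff]
      rw [ih (s + 1) k x]
      constructor
      · rintro ⟨j, hj, hx', hg, hc⟩
        refine ⟨j + 1, by simpa using Nat.succ_lt_succ hj, by push_cast at hx' ⊢; omega, by simpa using hg, ?_⟩
        simpa [List.count_cons, hz] using hc
      · rintro ⟨j, hj, hx', hg, hc⟩
        cases j with
        | zero => simp at hg; exact absurd hg hz
        | succ j' =>
          refine ⟨j', by simpa using hj, by push_cast at hx' ⊢; omega, by simpa using hg, ?_⟩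
          simpa [List.count_cons, hz] using hc

lemma positions_getD (st : List Int) (y : Int) :
    ((PySem.List.enumerate st 0).foldl (fun d iy => d.modify iy.2 [] (fun l => l ++ [iy.1])) PySem.Dict.empty).getD y []
    = ((PySem.List.enumerate st 0).filter (fun p => p.2 == y)).map (·.1) := by
  have h1 : ((PySem.List.enumerate st 0).foldl (fun d iy => d.modify iy.2 [] (fun l => l ++ [iy.1])) PySem.Dict.empty)
      = (((PySem.List.enumerate st 0).map Prod.swap).foldl (fun d p => d.modify p.1 [] (fun l => l ++ [p.2])) PySem.Dict.empty) := by
    rw [List.foldl_map]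
    rfl
  rw [h1, PySem.Dict.getD_foldl_modify_append]
  simp [List.filter_map, Function.comp_def, Prod.swap]

lemma balance_data_alt_eq_pvSpec (txt : List String) (st : List Int) :
    balance_data_alt txt st = pvSpec txt st (pvMostCommonLastCnt st) := by
  have hm := pvM_nonneg st
  set m := pvMostCommonLastCnt st with hmdef
  simp only [balance_data_alt]
  rw [← hmdef]
  set positions := (PySem.List.enumerate st 0).foldl
      (fun d iy => d.modify iy.2 [] (fun l => l ++ [iy.1])) PySem.Dict.empty with hpos
  set selected := positions.values.foldl
      (fun s idxs => PySem.Set.update s (PySem.List.slice idxs none (some m)))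
      PySem.Set.empty with hseldef
  have hkeys : positions.keys = PySem.Set.ofList st := by
    rw [hpos]
    exact (PySem.Dict.keys_foldl_modify_key (PySem.List.enumerate st 0) (fun iy => iy.2)
      ([] : List Int) (fun _ iy l => l ++ [iy.1]) PySem.Dict.empty).trans
      (by simp [PySem.Dict.keys_empty, PySem.Set.update_nil_left, PySem.List.map_snd_enumerate])
  have hnodup : positions.keys.Nodup := by
    rw [hpos]
    exact PySem.Dict.nodup_keys_foldl_modify_key (PySem.List.enumerate st 0) (fun iy => iy.2)
      ([] : List Int) (fun _ iy l => l ++ [iy.1]) PySem.Dict.empty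
      (by simp [PySem.Dict.keys_empty])
  have hvals : positions.values = positions.keys.map (fun k => positions.getD k []) :=
    PySem.Dict.values_eq_map_keys _ hnodup []
  have hgd : ∀ y, PySem.List.slice (positions.getD y []) none (some m)
      = (((PySem.List.enumerate st 0).filter (fun p => p.2 == y)).map (·.1)).take m.toNat := by
    intro y
    rw [PySem.List.slice_to _ hm, hpos, positions_getD]
  have hselmem : ∀ x : Int, (x ∈ selected) ↔
      ∃ y ∈ st, x ∈ (((PySem.List.enumerate st 0).filter (fun p => p.2 == y)).map (·.1)).take m.toNat := by
    intro x
    rw [hseldef, mem_foldl_update]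
    constructor
    · rintro (h | ⟨idxs, hidxs, hx⟩)
      · simp [PySem.Set.empty] at h
      · rw [hvals, hkeys] at hidxs
        obtain ⟨y, hy, rfl⟩ := List.mem_map.mp hidxs
        rw [hgd] at hx
        exact ⟨y, (PySem.Set.mem_ofList _ _).mp hy, hx⟩
    · rintro ⟨y, hy, hx⟩
      refine Or.inr ⟨positions.getD y [], ?_, ?_⟩
      · rw [hvals, hkeys]
        exact List.mem_map.mpr ⟨y, (PySem.Set.mem_ofList _ _).mpr hy, rfl⟩
      · rw [hgd]; exact hx
  have hcont : ∀ i : Nat, i < st.length → PySem.Set.contains selected ((i : Nat) : Int) = pvSel st m i := by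
    intro i hi
    rw [Bool.eq_iff_iff, PySem.Set.contains_iff, hselmem]
    unfold pvSel
    rw [decide_eq_true_iff]
    constructor
    · rintro ⟨y, hy, hmem⟩
      rw [mem_take_idx] at hmem
      obtain ⟨j, hj, hij, hg, hc⟩ := hmem
      have hij' : i = j := by omega
      subst hij'
      rw [hg]
      omega
    · intro hcnt
      refine ⟨st.getD i 0, ?_, ?_⟩
      · rw [List.getD_eq_getElem st 0 hi]
        exact List.getElem_mem hi
      · rw [mem_take_idx]
        exact ⟨i, hi, by omega, rfl, by omega⟩
  rw [PySem.List.pyRange_zero_nat st.length, List.foldl_map]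
  have hbody : (fun (acc : List String × List Int) (j : Nat) =>
      if PySem.Set.contains selected ((j : Nat) : Int) then
        (acc.1 ++ [PySem.List.pyGetD txt ((j : Nat) : Int) ""], acc.2 ++ [PySem.List.pyGetD st ((j : Nat) : Int) 0])
      else acc)
      = (fun (acc : List String × List Int) (j : Nat) =>
        ((if PySem.Set.contains selected ((j : Nat) : Int) then acc.1 ++ [PySem.List.pyGetD txt ((j : Nat) : Int) ""] else acc.1),
         (if PySem.Set.contains selected ((j : Nat) : Int) then acc.2 ++ [PySem.List.pyGetD st ((j : Nat) : Int) 0] else acc.2))) := by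
    funext acc j
    split_ifs <;> simp
  rw [hbody, PySem.List.foldl_prod_mk
        (fun a (j : Nat) => if PySem.Set.contains selected ((j : Nat) : Int) then a ++ [PySem.List.pyGetD txt ((j : Nat) : Int) ""] else a)
        (fun b (j : Nat) => if PySem.Set.contains selected ((j : Nat) : Int) then b ++ [PySem.List.pyGetD st ((j : Nat) : Int) 0] else b)
        (List.range st.length) [] [],
      PySem.List.foldl_append_if (fun (j : Nat) => PySem.Set.contains selected ((j : Nat) : Int))
        (fun (j : Nat) => PySem.List.pyGetD txt ((j : Nat) : Int) "") (List.range st.length) [],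
      PySem.List.foldl_append_if (fun (j : Nat) => PySem.Set.contains selected ((j : Nat) : Int))
        (fun (j : Nat) => PySem.List.pyGetD st ((j : Nat) : Int) 0) (List.range st.length) []]
  rw [List.filter_congr (fun j hj => hcont j (List.mem_range.mp hj))]
  simp [pvSpec, pvIdxs]

-- ===== VERDICT (by name: the statement is the Claim_ definition above) =====
theorem balance_data_spec : Claim_equal_balance_data := by
  intro txt st _ _
  unfold Spec_balance_data
  rw [balance_data_eq_pvSpec, balance_data_alt_eq_pvSpec]
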